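-- pv_equiv track=rewrite | github.com/varshaajio/LeetCode | solutions/3611-construct-the-minimum-bitwise-array-ii/solution.py | minBitwiseArray
-- ===== SOURCE A (Python) =====
-- def minBitwiseArray(nums):
--     ans = []
--     for p in nums:
--         if p == 2:
--             ans.append(-1)
--             continue
--         k = 0
--         temp = p
--         while temp & 1:
--             k += 1
--             temp >>= 1
--
--         ans.append(p - (1 << (k - 1)))
--     return ans
-- ===== SOURCE B (Python) =====
-- def minBitwiseArray(nums):
--     # closed form: the lowest zero bit of p is (~p) & (p+1) = 2**k where k = trailing ones of p
--     return [-1 if p == 2 else p - (1 << (((~p) & (p + 1)).bit_length() - 2)) for p in nums]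
-- ===== Notes on version B (the rewrite author's own statement) =====
-- stated objective: alternative
-- what changed: A counts the trailing one-bits of each element with an inner while loop, appending to an accumulator list; B is a list comprehension computing the same count in closed form as ((~p) & (p+1)).bit_length() - 1 (the lowest zero bit of p), with no inner loop.
import Mathlib
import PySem

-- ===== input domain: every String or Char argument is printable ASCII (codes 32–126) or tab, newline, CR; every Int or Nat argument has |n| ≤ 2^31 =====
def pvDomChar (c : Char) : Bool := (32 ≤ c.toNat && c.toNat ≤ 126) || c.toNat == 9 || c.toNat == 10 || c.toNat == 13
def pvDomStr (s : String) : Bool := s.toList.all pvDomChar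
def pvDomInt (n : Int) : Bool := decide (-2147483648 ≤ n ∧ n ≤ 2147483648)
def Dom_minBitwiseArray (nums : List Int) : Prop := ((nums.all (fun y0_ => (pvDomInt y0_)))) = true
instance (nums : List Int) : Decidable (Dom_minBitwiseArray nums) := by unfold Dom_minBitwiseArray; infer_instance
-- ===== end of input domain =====

-- B replaces A's inner trailing-ones counting loop by closed-form bit arithmetic:
-- k = ((~p) & (p+1)).bit_length() - 1, inside a list comprehension (alternative algorithm).


-- ===== PORT A =====
-- termination measure of A's inner while loop (cited by the port's decreasing_by)
lemma trailOnes_measure (t : Int) (h1 : PySem.Int.band t 1 = 1) (h2 : t ≠ -1) :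
    (t >>> (1:Nat)).natAbs < t.natAbs := by
  rw [PySem.Int.band_one] at h1
  simp only [PySem.Int.mod] at h1
  rw [Int.fmod_eq_emod_of_nonneg t (by norm_num)] at h1
  rw [Int.shiftRight_eq_div_pow]
  norm_num
  omega

-- A's inner 'while temp & 1: k += 1; temp >>= 1' loop; the extra 'temp ≠ -1' guard only
-- makes the recursion total (Python loops forever on temp = -1, which Pre_ excludes).
def trailOnes (temp : Int) (k : Int) : Int :=
  if h : PySem.Int.band temp 1 = 1 ∧ temp ≠ -1 then trailOnes (temp >>> (1:Nat)) (k+1) else k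
termination_by temp.natAbs
decreasing_by exact trailOnes_measure temp h.1 h.2

-- Python raises ValueError on '1 << (k-1)' when k = 0 (even p ≠ 2); Pre_ excludes those
-- inputs, and guarantees trailOnes p 0 ≥ 1 so the .toNat on the shift amount is exact.
def minBitwiseArray (nums : List Int) : List Int :=
  nums.foldl (fun ans p =>
    if p = 2 then ans ++ [-1]
    else ans ++ [p - ((1:Int) <<< (trailOnes p 0 - 1).toNat)]) []

-- ===== PORT B =====
-- Python raises ValueError on the 1 << negative shift (even p ≠ 2, or p = -1); Pre_
-- excludes those inputs, where the shift amount is ≥ 0 and the .toNat is exact.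
def minBitwiseArray_alt (nums : List Int) : List Int :=
  nums.map (fun p => if p = 2 then -1
    else p - ((1:Int) <<< (((PySem.Int.bitLength (PySem.Int.band (Int.not p) (p+1)) : Int) - 2).toNat)))

-- ===== PRECONDITION & SPEC =====
-- Pre_ excludes exactly the inputs on which A does not return: an even element ≠ 2 makes A
-- raise ValueError ('1 << -1'), and the element -1 makes A's while loop run forever.
def Pre_minBitwiseArray (nums : List Int) : Prop :=
  ∀ p ∈ nums, p = 2 ∨ (PySem.Int.band p 1 = 1 ∧ p ≠ -1)
instance (nums : List Int) : Decidable (Pre_minBitwiseArray nums) := by unfold Pre_minBitwiseArray; infer_instance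
def pvWitness_minBitwiseArray : List Int := [3, 2, 5, -3, 7]

def Spec_minBitwiseArray (nums : List Int) (out : List Int) : Prop := out = minBitwiseArray_alt nums
instance (nums : List Int) (out : List Int) : Decidable (Spec_minBitwiseArray nums out) := by unfold Spec_minBitwiseArray; infer_instance

-- ===== CLAIM (what is proved, stated in full; the proofs are below) =====
def Claim_equal_minBitwiseArray : Prop := ∀ (nums : List Int), Dom_minBitwiseArray nums → Pre_minBitwiseArray nums → Spec_minBitwiseArray nums (minBitwiseArray nums)

-- ===== LEMMAS AND PROOFS =====

lemma band_one_eq_emod (t : Int) : PySem.Int.band t 1 = t % 2 := by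
  rw [PySem.Int.band_one]
  simp only [PySem.Int.mod]
  exact Int.fmod_eq_emod_of_nonneg t (by norm_num)

-- Nat level: f n := n - (n &&& (n-1)) is the lowest set bit of n.
lemma nat_and_pred_of_odd (m : Nat) : (2*m+1) &&& (2*m) = 2*m := by
  apply Nat.eq_of_testBit_eq
  intro i
  have h1 : (2*m+1)/2 = m := by omega
  have h2 : (2*m)/2 = m := by omega
  cases i with
  | zero => rw [Nat.testBit_and]; simp [Nat.testBit_zero]
  | succ i => rw [Nat.testBit_and, Nat.testBit_succ, Nat.testBit_succ, h1, h2, Bool.and_self]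

lemma nat_and_pred_double (n : Nat) (h : 1 ≤ n) : (2*n) &&& (2*n-1) = 2*(n &&& (n-1)) := by
  apply Nat.eq_of_testBit_eq
  intro i
  have h1 : (2*n)/2 = n := by omega
  have h2 : (2*n-1)/2 = n-1 := by omega
  have h3 : (2*(n &&& (n-1))) % 2 = 0 := by omega
  have h4 : (2*(n &&& (n-1)))/2 = n &&& (n-1) := by omega
  cases i with
  | zero => rw [Nat.testBit_and]; simp [Nat.testBit_zero, h3]
  | succ i => rw [Nat.testBit_and, Nat.testBit_succ, Nat.testBit_succ, Nat.testBit_succ, h1, h2, h4, Nat.testBit_and]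

lemma natF_odd (n : Nat) (h : n % 2 = 1) : n - (n &&& (n-1)) = 1 := by
  obtain ⟨m, rfl⟩ : ∃ m, n = 2*m+1 := ⟨n/2, by omega⟩
  have e : (2*m+1) - 1 = 2*m := by omega
  rw [e, nat_and_pred_of_odd]
  omega

lemma natF_double (n : Nat) : 2*n - ((2*n) &&& (2*n-1)) = 2*(n - (n &&& (n-1))) := by
  rcases Nat.eq_zero_or_pos n with h | h
  · subst h; simp
  · rw [nat_and_pred_double n h]
    have := @Nat.and_le_left n (n-1)
    omega

-- band x (-x) reduces to the Nat-level f on |x|.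
lemma lsb_natAbs (x : Int) : PySem.Int.band x (-x) = ((x.natAbs - (x.natAbs &&& (x.natAbs - 1)) : Nat) : Int) := by
  unfold PySem.Int.band
  rcases lt_trichotomy x 0 with h | h | h
  · rw [if_neg (by omega), if_pos (by omega)]
    have e1 : (-x).toNat = x.natAbs := by omega
    have e2 : (-x - 1).toNat = x.natAbs - 1 := by omega
    rw [e1, e2]
  · subst h; simp
  · rw [if_pos (by omega), if_neg (by omega)]
    simp only [neg_neg]
    have e1 : x.toNat = x.natAbs := by omega
    have e2 : (x - 1).toNat = x.natAbs - 1 := by omega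
    rw [e1, e2]

lemma lsb_odd (x : Int) (h : x % 2 = 1) : PySem.Int.band x (-x) = 1 := by
  rw [lsb_natAbs, natF_odd x.natAbs (by omega)]
  norm_num

lemma lsb_double (x : Int) : PySem.Int.band (2*x) (-(2*x)) = 2 * PySem.Int.band x (-x) := by
  rw [lsb_natAbs, lsb_natAbs]
  have hn : (2*x).natAbs = 2 * x.natAbs := by omega
  rw [hn, natF_double]
  push_cast
  ring

-- the accumulator of A's loop only shifts the result
lemma trailOnes_acc_aux (n : Nat) : ∀ t : Int, t.natAbs = n → ∀ k, trailOnes t k = k + trailOnes t 0 := by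
  induction n using Nat.strong_induction_on with
  | _ n ih =>
    intro t ht k
    conv_lhs => rw [trailOnes]
    conv_rhs => rw [trailOnes]
    by_cases h : PySem.Int.band t 1 = 1 ∧ t ≠ -1
    · rw [dif_pos h, dif_pos h]
      have hlt : (t >>> (1:Nat)).natAbs < n := ht ▸ trailOnes_measure t h.1 h.2
      rw [ih _ hlt _ rfl (k+1), ih _ hlt _ rfl (0+1)]
      ring
    · rw [dif_neg h, dif_neg h]
      ring

lemma trailOnes_acc (t : Int) (k : Int) : trailOnes t k = k + trailOnes t 0 :=
  trailOnes_acc_aux t.natAbs t rfl k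

-- key lemma: for odd t ≠ -1, trailOnes t 0 ≥ 1 and lsb (t+1) = 2 ^ trailOnes t 0
lemma key (n : Nat) : ∀ t : Int, t.natAbs = n → PySem.Int.band t 1 = 1 → t ≠ -1 →
    1 ≤ trailOnes t 0 ∧ PySem.Int.band (t+1) (-(t+1)) = (1:Int) <<< (trailOnes t 0).toNat := by
  induction n using Nat.strong_induction_on with
  | _ n ih =>
    intro t ht hodd hne
    have hmod : t % 2 = 1 := by rw [← band_one_eq_emod]; exact hodd
    have hu2 : t >>> (1:Nat) = t / 2 := by rw [Int.shiftRight_eq_div_pow]; norm_num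
    set u := t >>> (1:Nat) with hu
    have ht2 : t = 2*u + 1 := by omega
    have hone : trailOnes t 0 = 1 + trailOnes u 0 := by
      conv_lhs => rw [trailOnes]
      rw [dif_pos ⟨hodd, hne⟩, trailOnes_acc]
      ring
    have ht1 : t + 1 = 2*(u+1) := by omega
    by_cases hub : PySem.Int.band u 1 = 1
    · have hune : u ≠ -1 := by intro hc; rw [hc] at ht2; omega
      have hlt : u.natAbs < n := ht ▸ trailOnes_measure t hodd hne
      obtain ⟨ih1, ih2⟩ := ih u.natAbs hlt u rfl hub hune
      constructor
      · rw [hone]; omega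
      · rw [ht1, lsb_double, ih2, hone]
        have e : (1 + trailOnes u 0).toNat = (trailOnes u 0).toNat + 1 := by omega
        rw [e, Int.shiftLeft_eq, Int.shiftLeft_eq, pow_succ]
        ring
    · have hzero : trailOnes u 0 = 0 := by
        rw [trailOnes, dif_neg (fun hc => hub hc.1)]
      have humod : u % 2 = 0 := by
        rw [band_one_eq_emod] at hub; omega
      have huodd1 : (u+1) % 2 = 1 := by omega
      constructor
      · rw [hone, hzero]; norm_num
      · rw [ht1, lsb_double, lsb_odd (u+1) huodd1, hone, hzero]
        decide

lemma int_not_eq (p : Int) : Int.not p = -(p+1) := by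
  cases p with
  | ofNat n => simp [Int.not, Int.negSucc_eq]
  | negSucc n => simp [Int.not, Int.negSucc_eq]

lemma pow_bitLength (k : Nat) : PySem.Int.bitLength ((2:Int)^k) = k+1 := by
  induction k with
  | zero => decide
  | succ k ih =>
    have h : ((2:Int)^(k+1)) = ((2^(k+1) : Nat) : Int) := by push_cast; ring
    have h2 : ((2:Int)^k) = ((2^k : Nat) : Int) := by push_cast; ring
    rw [h, PySem.Int.bitLength_natCast (by positivity)]
    have h3 : (2:Nat)^(k+1)/2 = 2^k := by rw [pow_succ]; omega
    rw [h3, ← h2, ih]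

-- per-element agreement, A's step vs B's step
lemma elem_eq (p : Int) (h : PySem.Int.band p 1 = 1) (hne : p ≠ -1) :
    p - ((1:Int) <<< (trailOnes p 0 - 1).toNat)
    = p - ((1:Int) <<< (((PySem.Int.bitLength (PySem.Int.band (Int.not p) (p+1)) : Int) - 2).toNat)) := by
  obtain ⟨h1, h2⟩ := key p.natAbs p rfl h hne
  rw [int_not_eq p, PySem.Int.band_comm, h2]
  rw [show ((1:Int) <<< (trailOnes p 0).toNat) = (2:Int)^(trailOnes p 0).toNat from by
    rw [Int.shiftLeft_eq, one_mul]]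
  rw [pow_bitLength]
  have e : ((((trailOnes p 0).toNat + 1 : Nat) : Int) - 2).toNat = (trailOnes p 0 - 1).toNat := by
    omega
  rw [e]

lemma fold_eq_map (nums : List Int) : ∀ acc, Pre_minBitwiseArray nums →
    nums.foldl (fun ans p =>
      if p = 2 then ans ++ [-1]
      else ans ++ [p - ((1:Int) <<< (trailOnes p 0 - 1).toNat)]) acc
    = acc ++ nums.map (fun p => if p = 2 then -1
        else p - ((1:Int) <<< (((PySem.Int.bitLength (PySem.Int.band (Int.not p) (p+1)) : Int) - 2).toNat))) := by
  induction nums with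
  | nil => intro acc _; simp
  | cons p rest ih =>
    intro acc hpre
    have hp := hpre p (List.mem_cons_self ..)
    have hrest : Pre_minBitwiseArray rest := fun q hq => hpre q (List.mem_cons_of_mem _ hq)
    simp only [List.foldl_cons, List.map_cons]
    by_cases h2 : p = 2
    · rw [if_pos h2, if_pos h2, ih _ hrest, List.append_assoc]
      rfl
    · have hodd : PySem.Int.band p 1 = 1 ∧ p ≠ -1 := hp.resolve_left h2
      rw [if_neg h2, if_neg h2, ih _ hrest, List.append_assoc, elem_eq p hodd.1 hodd.2]
      rfl

-- ===== VERDICT (by name: the statement is the Claim_ definition above) =====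
theorem minBitwiseArray_spec : Claim_equal_minBitwiseArray := by
  intro nums _hdom hpre
  unfold Spec_minBitwiseArray minBitwiseArray minBitwiseArray_alt
  rw [fold_eq_map nums [] hpre]
  rfl
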